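-- pv_equiv track=rewrite | github.com/CBike/ROS2 | src/can_bridge/can_bridge/sendparser_example.py | extract_bits
-- ===== SOURCE A (Python) =====
-- def extract_bits(byte_array, start_bit, end_bit):
--     """Extracts bits from a bytearray within the specified bit range.
--
--     Args:
--         byte_array (bytearray): The bytearray from which bits will be extracted.
--         start_bit (int): The starting bit index (inclusive) of the range to extract.
--         end_bit (int): The ending bit index (inclusive) of the range to extract.
--
--     Returns:
--         int: The extracted bits within the specified bit range.
--
--     This function extracts bits from the given bytearray within the specified bit range.
--     It iterates through each bit in the range and extracts it from the corresponding byte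
--     in the bytearray. The extracted bits are combined and returned as an integer.
--     """
--     # Calculate the number of bits in the range
--     num_bits = end_bit - start_bit + 1
--
--     # Variable to store the extracted bits
--     extracted_bits = 0
--
--     # Extract bits from the bytearray and add them to extracted_bits
--     for i in range(num_bits):
--         # Calculate the index of the current bit
--         bit_index = start_bit + i
--
--         # Calculate the index and offset of the byte containing the current bit
--         byte_index, bit_offset = divmod(bit_index, 8)
--
--         # Extract the bit from the byte and add it to extracted_bits
--         extracted_bits <<= 1
--         extracted_bits |= (byte_array[byte_index] >> (7 - bit_offset)) & 1
--
--     return extracted_bits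
-- ===== SOURCE B (Python) =====
-- def extract_bits(byte_array, start_bit, end_bit):
--     """Whole-byte version: build the covered bytes into one integer, then
--     shift and reduce, instead of looping once per bit."""
--     if end_bit < start_bit:
--         return 0
--     first_byte = start_bit // 8
--     last_byte = end_bit // 8
--     value = 0
--     for j in range(first_byte, last_byte + 1):
--         value = value * 256 + byte_array[j] % 256
--     value >>= 7 - end_bit % 8
--     return value % (1 << (end_bit - start_bit + 1))
-- ===== Notes on version B (the rewrite author's own statement) =====
-- stated objective: alternative
-- what changed: B loops once per covered BYTE (building the covered bytes into one integer) and extracts the range with a single shift and modulus, instead of A's loop once per BIT with per-bit divmod, shift and or.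
import Mathlib
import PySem

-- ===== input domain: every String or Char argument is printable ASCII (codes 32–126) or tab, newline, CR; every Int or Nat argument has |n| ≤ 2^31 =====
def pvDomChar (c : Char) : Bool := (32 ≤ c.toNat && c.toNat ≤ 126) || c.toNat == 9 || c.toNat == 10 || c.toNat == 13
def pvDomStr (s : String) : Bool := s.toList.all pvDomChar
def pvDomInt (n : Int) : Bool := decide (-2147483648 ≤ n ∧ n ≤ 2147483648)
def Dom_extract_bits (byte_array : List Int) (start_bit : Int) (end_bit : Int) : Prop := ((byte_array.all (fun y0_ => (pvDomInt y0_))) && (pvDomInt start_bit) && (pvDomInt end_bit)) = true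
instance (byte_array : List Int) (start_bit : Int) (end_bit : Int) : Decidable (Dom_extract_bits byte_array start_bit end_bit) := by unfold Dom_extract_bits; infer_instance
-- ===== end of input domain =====

-- B replaces A's one-iteration-per-bit loop by one loop per covered byte plus a
-- single shift and modulus (objective: alternative decomposition, same observable behaviour).

-- ===== PORT A =====
def extract_bits (byte_array : List Int) (start_bit : Int) (end_bit : Int) : Int :=
  -- num_bits = end_bit - start_bit + 1; for i in range(num_bits): …
  (PySem.List.pyRange 0 (end_bit - start_bit + 1) 1).foldl (fun extracted_bits i =>
      let bit_index := start_bit + i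
      let byte_index := PySem.Int.floordiv bit_index 8
      let bit_offset := PySem.Int.mod bit_index 8
      -- (extracted_bits << 1) | ((byte_array[byte_index] >> (7 - bit_offset)) & 1)
      PySem.Int.bor (extracted_bits <<< (1 : Nat))
        (PySem.Int.band ((PySem.List.pyGetD byte_array byte_index 0) >>> (7 - bit_offset).toNat) 1))
    0

-- ===== PORT B =====
def extract_bits_alt (byte_array : List Int) (start_bit : Int) (end_bit : Int) : Int :=
  if end_bit < start_bit then 0
  else
    let first_byte := PySem.Int.floordiv start_bit 8
    let last_byte := PySem.Int.floordiv end_bit 8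
    -- for j in range(first_byte, last_byte + 1): value = value * 256 + byte_array[j] % 256
    let value := (PySem.List.pyRange first_byte (last_byte + 1) 1).foldl
      (fun value j => value * 256 + PySem.Int.mod (PySem.List.pyGetD byte_array j 0) 256) 0
    -- (value >> (7 - end_bit % 8)) % (1 << num_bits)
    PySem.Int.mod (value >>> (7 - PySem.Int.mod end_bit 8).toNat)
      (1 <<< (end_bit - start_bit + 1).toNat)

-- ===== PRECONDITION & SPEC =====
-- A raises IndexError iff some accessed byte index falls outside [-len, len);
-- with a non-empty bit range that happens exactly when start_bit < -8*len or end_bit ≥ 8*len.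
def Pre_extract_bits (byte_array : List Int) (start_bit : Int) (end_bit : Int) : Prop :=
  start_bit ≤ end_bit →
    (-(8 * (byte_array.length : Int)) ≤ start_bit ∧ end_bit < 8 * (byte_array.length : Int))
instance (byte_array : List Int) (start_bit : Int) (end_bit : Int) : Decidable (Pre_extract_bits byte_array start_bit end_bit) := by unfold Pre_extract_bits; infer_instance

def pvWitness_extract_bits : List Int × Int × Int := ([255, 1], 4, 11)

def Spec_extract_bits (byte_array : List Int) (start_bit : Int) (end_bit : Int) (out : Int) : Prop := out = extract_bits_alt byte_array start_bit end_bit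
instance (byte_array : List Int) (start_bit : Int) (end_bit : Int) (out : Int) : Decidable (Spec_extract_bits byte_array start_bit end_bit out) := by unfold Spec_extract_bits; infer_instance

-- ===== CLAIM (what is proved, stated in full; the proofs are below) =====
def Claim_equal_extract_bits : Prop := ∀ (byte_array : List Int) (start_bit : Int) (end_bit : Int), Dom_extract_bits byte_array start_bit end_bit → Pre_extract_bits byte_array start_bit end_bit → Spec_extract_bits byte_array start_bit end_bit (extract_bits byte_array start_bit end_bit)

-- ===== LEMMAS AND PROOFS =====

-- the bit A extracts at absolute bit position b, written with plain Int division
def pvBit (ba : List Int) (b : Int) : Int :=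
  ((PySem.List.pyGetD ba (PySem.Int.floordiv b 8) 0) / 2 ^ (7 - PySem.Int.mod b 8).toNat) % 2

-- the big-endian integer B's loop builds from bytes lo..hi
def pvVal (ba : List Int) (lo hi : Int) : Int :=
  (PySem.List.pyRange lo (hi + 1) 1).foldl
    (fun value j => value * 256 + PySem.Int.mod (PySem.List.pyGetD ba j 0) 256) 0

lemma shl_one (a : Int) : a <<< (1 : Nat) = 2 * a := by
  rw [← Int.shiftLeft_natCast_right, Int.shiftLeft_eq_mul_pow]; push_cast; ring

lemma shr_pow (m : Int) (n : Nat) : m >>> n = m / 2 ^ n := by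
  rw [Int.shiftRight_eq_div_pow]; push_cast; ring_nf

lemma nat_two_mul_or_one (t : Nat) : 2 * t ||| 1 = 2 * t + 1 := by
  apply Nat.eq_of_testBit_eq; intro i
  rw [Nat.testBit_lor]
  cases i with
  | zero =>
      simp only [Nat.testBit_zero]
      have h1 : (2 * t) % 2 = 0 := by omega
      have h2 : (2 * t + 1) % 2 = 1 := by omega
      simp [h1, h2]
  | succ j =>
      rw [Nat.testBit_succ, Nat.testBit_succ, Nat.testBit_succ]
      have h1 : 2 * t / 2 = t := by omega
      have h2 : (2 * t + 1) / 2 = t := by omega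
      have h3 : 1 / 2 = 0 := by omega
      simp [h1, h2, h3]

lemma pvVal_rec (ba : List Int) (lo hi : Int) (h : lo ≤ hi) :
    pvVal ba lo hi = 256 * pvVal ba lo (hi - 1) + PySem.Int.mod (PySem.List.pyGetD ba hi 0) 256 := by
  unfold pvVal
  have h1 : hi - 1 + 1 = hi := by ring
  rw [h1, PySem.List.pyRange_one_succ_right h, List.foldl_append]
  simp [mul_comm]

-- Python `x | 1` on an even nonnegative x just adds the bit
lemma bor_shift (a b : Int) (ha : 0 ≤ a) (hb : b = 0 ∨ b = 1) :
    PySem.Int.bor (a <<< (1 : Nat)) b = 2 * a + b := by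
  rw [shl_one]
  rcases hb with hb | hb <;> subst hb
  · simp [PySem.Int.bor_zero]
  · rw [PySem.Int.bor_of_nonneg (by omega) (by omega)]
    have h2 : (2 * a).toNat = 2 * a.toNat := by omega
    rw [h2, show ((1:Int)).toNat = 1 from rfl, nat_two_mul_or_one]
    push_cast
    omega

lemma A_step_nonneg (y acc : Int) (hacc : 0 ≤ acc) :
    0 ≤ PySem.Int.bor (acc <<< (1 : Nat)) (PySem.Int.band y 1) := by
  rw [PySem.Int.band_one, PySem.Int.mod_eq_emod_of_pos (by norm_num)]
  rw [bor_shift acc _ hacc (by omega)]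
  omega

lemma A_nonneg (ba : List Int) (s e : Int) : 0 ≤ extract_bits ba s e := by
  unfold extract_bits
  have h : ∀ (l : List Int) (v : Int), 0 ≤ v →
      0 ≤ l.foldl (fun extracted_bits i =>
        PySem.Int.bor (extracted_bits <<< (1 : Nat))
          (PySem.Int.band ((PySem.List.pyGetD ba (PySem.Int.floordiv (s + i) 8) 0) >>>
            (7 - PySem.Int.mod (s + i) 8).toNat) 1)) v := by
    intro l
    induction l with
    | nil => intro v hv; simpa using hv
    | cons x xs ih =>
        intro v hv
        simp only [List.foldl_cons]
        exact ih _ (A_step_nonneg _ _ hv)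
  exact h _ 0 le_rfl

lemma A_nil (ba : List Int) (s e : Int) (h : e < s) : extract_bits ba s e = 0 := by
  unfold extract_bits
  rw [PySem.List.pyRange_one_eq_nil (by omega)]
  rfl

lemma A_rec (ba : List Int) (s e : Int) (h : s ≤ e) :
    extract_bits ba s e = 2 * extract_bits ba s (e - 1) + pvBit ba e := by
  unfold extract_bits
  have h1 : e - s + 1 = (e - s) + 1 := by ring
  rw [h1, PySem.List.pyRange_one_succ_right (by omega), List.foldl_append]
  have h2 : e - 1 - s + 1 = e - s := by ring
  rw [h2]
  simp only [List.foldl_cons, List.foldl_nil]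
  have h3 : s + (e - s) = e := by ring
  rw [h3]
  rw [PySem.Int.band_one, PySem.Int.mod_eq_emod_of_pos (by norm_num)]
  rw [bor_shift _ _ (by
        have := A_nonneg ba s (e - 1)
        unfold extract_bits at this
        rwa [h2] at this)
      (by omega)]
  unfold pvBit
  rw [shr_pow]

-- dropping k<8 low bits then taking one bit only depends on the low byte
lemma key256 (q x : Int) (k : Nat) (hk : k ≤ 7) :
    ((256 * q + x % 256) / 2 ^ k) % 2 = (x / 2 ^ k) % 2 := by
  have inner : ∀ a : Int, ((256 * a + x % 256) / 2 ^ k) % 2 = ((x % 256) / 2 ^ k) % 2 := by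
    intro a
    have h8 : ((2:Int) ^ (7 - k)) * 2 * 2 ^ k = 256 := by
      rw [show ((2:Int) ^ (7 - k)) * 2 * 2 ^ k = 2 ^ ((7 - k) + 1 + k) by
        rw [pow_add, pow_add, pow_one]]
      rw [show (7 - k) + 1 + k = 8 by omega]
      norm_num
    have h1 : 256 * a + x % 256 = x % 256 + (2 ^ (7 - k) * 2 * a) * 2 ^ k := by
      linear_combination (-a) * h8
    rw [h1, Int.add_mul_ediv_right _ _ (by positivity : (2:Int) ^ k ≠ 0)]
    rw [mul_comm (2 ^ (7 - k) : Int) 2, mul_assoc]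
    rw [Int.add_mul_emod_self_left]
  rw [inner q]
  conv_rhs => rw [show x = 256 * (x / 256) + x % 256 from (Int.mul_ediv_add_emod x 256).symm]
  rw [inner (x / 256)]

lemma two_pow_split (x : Int) (n : Nat) :
    x % 2 ^ (n + 1) = 2 * ((x / 2) % 2 ^ n) + x % 2 := by
  have hp : (0:Int) < 2 ^ n := by positivity
  have h1 := Int.mul_ediv_add_emod x 2
  have h2 := Int.mul_ediv_add_emod (x / 2) (2 ^ n)
  have hr1 : 0 ≤ x % 2 := Int.emod_nonneg x (by norm_num)
  have hr2 : x % 2 < 2 := Int.emod_lt_of_pos x (by norm_num)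
  have hm1 : 0 ≤ (x / 2) % 2 ^ n := Int.emod_nonneg _ (by positivity)
  have hm2 : (x / 2) % 2 ^ n < 2 ^ n := Int.emod_lt_of_pos _ hp
  have hx : x = (2 ^ (n + 1)) * ((x / 2) / 2 ^ n) + (2 * ((x / 2) % 2 ^ n) + x % 2) := by
    rw [pow_succ]; linarith
  conv_lhs => rw [hx]
  rw [add_comm, Int.add_mul_emod_self_left]
  exact Int.emod_eq_of_lt (by linarith) (by rw [pow_succ]; linarith)

-- core: A's bit loop equals shift-and-mod over the byte-built value
lemma key (ba : List Int) : ∀ (n : Nat) (s e : Int), e - s + 1 = n →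
    extract_bits ba s e =
      (pvVal ba (PySem.Int.floordiv s 8) (PySem.Int.floordiv e 8) >>>
        (7 - PySem.Int.mod e 8).toNat) % 2 ^ n := by
  intro n
  induction n with
  | zero =>
      intro s e hn
      rw [A_nil ba s e (by omega)]
      simp
  | succ n ih =>
      intro s e hn
      have hse : s ≤ e := by omega
      have hm0 : 0 ≤ PySem.Int.mod e 8 := PySem.Int.mod_nonneg e (by norm_num)
      have hm8 : PySem.Int.mod e 8 < 8 := PySem.Int.mod_lt e (by norm_num)
      have hfe := PySem.Int.floordiv_mul_add_mod e 8
      have hfs0 : 0 ≤ PySem.Int.mod s 8 := PySem.Int.mod_nonneg s (by norm_num)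
      have hfs8 : PySem.Int.mod s 8 < 8 := PySem.Int.mod_lt s (by norm_num)
      have hfs := PySem.Int.floordiv_mul_add_mod s 8
      have hlohi : PySem.Int.floordiv s 8 ≤ PySem.Int.floordiv e 8 := by omega
      have hx256 : PySem.Int.mod (PySem.List.pyGetD ba (PySem.Int.floordiv e 8) 0) 256
          = (PySem.List.pyGetD ba (PySem.Int.floordiv e 8) 0) % 256 :=
        PySem.Int.mod_eq_emod_of_pos (by norm_num)
      have hV := pvVal_rec ba (PySem.Int.floordiv s 8) (PySem.Int.floordiv e 8) hlohi
      rw [hx256] at hV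
      have hk7 : (7 - PySem.Int.mod e 8).toNat ≤ 7 := by omega
      -- the extracted low bit
      have claim2 : pvBit ba e =
          (pvVal ba (PySem.Int.floordiv s 8) (PySem.Int.floordiv e 8) /
            2 ^ (7 - PySem.Int.mod e 8).toNat) % 2 := by
        rw [hV, key256 _ _ _ hk7]
        rfl
      -- the remaining high bits
      have claim1 : pvVal ba (PySem.Int.floordiv s 8) (PySem.Int.floordiv (e - 1) 8) /
            2 ^ (7 - PySem.Int.mod (e - 1) 8).toNat
          = pvVal ba (PySem.Int.floordiv s 8) (PySem.Int.floordiv e 8) /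
            2 ^ (7 - PySem.Int.mod e 8).toNat / 2 := by
        by_cases hm : PySem.Int.mod e 8 = 0
        · have hfd1 : PySem.Int.floordiv (e - 1) 8 = PySem.Int.floordiv e 8 - 1 := by
            rw [PySem.Int.floordiv_eq_iff_of_pos (by norm_num)]
            omega
          have hmd1 : PySem.Int.mod (e - 1) 8 = 7 := by
            have := PySem.Int.floordiv_mul_add_mod (e - 1) 8
            rw [hfd1] at this
            omega
          have hr0 : 0 ≤ (PySem.List.pyGetD ba (PySem.Int.floordiv e 8) 0) % 256 :=
            Int.emod_nonneg _ (by norm_num)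
          have hr256 : (PySem.List.pyGetD ba (PySem.Int.floordiv e 8) 0) % 256 < 256 :=
            Int.emod_lt_of_pos _ (by norm_num)
          rw [hfd1, hmd1, hm]
          rw [show ((7:Int) - 7).toNat = 0 by decide, show ((7:Int) - 0).toNat = 7 by decide]
          rw [pow_zero, Int.ediv_one]
          rw [Int.ediv_ediv_of_nonneg (by norm_num : (0:Int) ≤ 2 ^ 7)]
          rw [show ((2:Int) ^ 7 * 2) = 256 by norm_num]
          rw [hV, add_comm, mul_comm]
          rw [Int.add_mul_ediv_right _ _ (by norm_num : (256:Int) ≠ 0)]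
          rw [Int.ediv_eq_zero_of_lt hr0 hr256]
          ring
        · have hfd1 : PySem.Int.floordiv (e - 1) 8 = PySem.Int.floordiv e 8 := by
            rw [PySem.Int.floordiv_eq_iff_of_pos (by norm_num)]
            omega
          have hmd1 : PySem.Int.mod (e - 1) 8 = PySem.Int.mod e 8 - 1 := by
            have := PySem.Int.floordiv_mul_add_mod (e - 1) 8
            rw [hfd1] at this
            omega
          have hkk : (7 - PySem.Int.mod (e - 1) 8).toNat
              = (7 - PySem.Int.mod e 8).toNat + 1 := by omega
          rw [hfd1, hkk, pow_succ,
            ← Int.ediv_ediv_of_nonneg (by positivity : (0:Int) ≤ 2 ^ (7 - PySem.Int.mod e 8).toNat)]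
      rw [A_rec ba s e hse, ih s (e - 1) (by omega)]
      rw [shr_pow, shr_pow, two_pow_split, claim1, claim2]


-- ===== VERDICT (by name: the statement is the Claim_ definition above) =====
theorem extract_bits_spec : Claim_equal_extract_bits := by
  intro ba s e _ _
  unfold Spec_extract_bits
  by_cases h : e < s
  · rw [A_nil ba s e h]
    unfold extract_bits_alt
    rw [if_pos h]
  · have halt : extract_bits_alt ba s e =
        PySem.Int.mod (pvVal ba (PySem.Int.floordiv s 8) (PySem.Int.floordiv e 8) >>>
          (7 - PySem.Int.mod e 8).toNat) (1 <<< (e - s + 1).toNat) := by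
      unfold extract_bits_alt pvVal
      rw [if_neg h]
    rw [halt, show ((1 <<< (e - s + 1).toNat : Nat) : Int) = 2 ^ (e - s + 1).toNat by
          rw [Nat.one_shiftLeft]; push_cast; ring]
    rw [PySem.Int.mod_eq_emod_of_pos (by positivity)]
    exact key ba (e - s + 1).toNat s e (by omega)
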